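-- pv_equiv track=rewrite | github.com/plone/plone.app.vocabularies | plone/app/vocabularies/principals.py | merge_principal_infos
-- ===== SOURCE A (Python) =====
-- def merge_principal_infos(infos, prefix=False):
--     info = infos[0]
--     if len(infos) > 1:
--         principal_types = {
--             info["principal_type"] for info in infos if info["principal_type"]
--         }
--         if len(principal_types) > 1:
--             # Principals with the same ID but different types. Should not
--             # happen.
--             raise ValueError("Principal ID not unique: {}".format(info["id"]))
--         if not info["title"]:
--             for candidate in infos:
--                 if candidate["title"]:
--                     info["title"] = candidate["title"]
--                     break
--     return info
-- ===== SOURCE B (Python) =====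
-- def merge_principal_infos(infos, prefix=False):
--     info = infos[0]
--     if len(infos) > 1:
--         if not _types_consistent(infos, None):
--             raise ValueError("Principal ID not unique: {}".format(info["id"]))
--         if not info["title"]:
--             title = _first_nonempty_title(infos)
--             if title is not None:
--                 info["title"] = title
--     return info
--
--
-- def _types_consistent(infos, seen):
--     """Structural recursion: thread the first non-empty principal_type seen."""
--     if not infos:
--         return True
--     pt = infos[0]["principal_type"]
--     if pt and seen is not None and pt != seen:
--         return False
--     return _types_consistent(infos[1:], pt if pt else seen)
--
--
-- def _first_nonempty_title(infos):
--     """Structural recursion: first non-empty title, or None."""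
--     if not infos:
--         return None
--     t = infos[0]["title"]
--     if t:
--         return t
--     return _first_nonempty_title(infos[1:])
-- ===== Notes on version B (the rewrite author's own statement) =====
-- stated objective: alternative
-- what changed: A uses a set comprehension over all principal_types plus an in-loop mutation to backfill the title; B is a recursive decomposition: a pure structurally-recursive consistency predicate threading the first non-empty type, and a recursive search returning the first non-empty title as a value, assigned afterwards.
import Mathlib
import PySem

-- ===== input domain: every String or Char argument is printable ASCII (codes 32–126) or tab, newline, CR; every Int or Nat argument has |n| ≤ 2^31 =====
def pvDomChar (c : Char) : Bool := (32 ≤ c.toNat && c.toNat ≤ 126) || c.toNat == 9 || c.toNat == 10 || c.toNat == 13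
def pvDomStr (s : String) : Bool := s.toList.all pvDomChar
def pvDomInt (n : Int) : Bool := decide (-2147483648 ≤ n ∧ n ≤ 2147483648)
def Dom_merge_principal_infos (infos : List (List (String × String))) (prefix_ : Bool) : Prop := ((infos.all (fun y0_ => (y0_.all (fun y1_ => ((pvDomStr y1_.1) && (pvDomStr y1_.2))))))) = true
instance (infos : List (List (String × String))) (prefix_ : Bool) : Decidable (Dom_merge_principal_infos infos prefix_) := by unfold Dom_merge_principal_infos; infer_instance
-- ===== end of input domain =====

-- B replaces A's set-comprehension uniqueness test and in-loop title mutation by two recursive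
-- helpers (a consistency predicate threading the first non-empty type, and a search returning the
-- first non-empty title, assigned afterwards); equivalence is about the return value (both Pythons
-- also mutate infos[0]['title'] identically on the admitted inputs).

-- ===== PORT A =====
-- Python: for candidate in infos: if candidate["title"]: info["title"] = candidate["title"]; break
def pvFindTitleA : List (List (String × String)) → PySem.Dict String String → PySem.Dict String String
  | [], info => info
  | c :: rest, info =>
      if (PySem.Dict.mk c).getD "title" "" ≠ "" then
        info.insert "title" ((PySem.Dict.mk c).getD "title" "")
      else pvFindTitleA rest info

def merge_principal_infos (infos : List (List (String × String))) (prefix_ : Bool) : List (String × String) :=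
  match infos with
  | [] => []  -- infos[0] raises IndexError; excluded by Pre_
  | info :: _ =>
    if 1 < infos.length then
      -- {info["principal_type"] for info in infos if info["principal_type"]}
      let ptypes : PySem.Set String := infos.foldl (fun s d =>
        let pt := (PySem.Dict.mk d).getD "principal_type" ""
        if pt ≠ "" then PySem.Set.add s pt else s) PySem.Set.empty
      if 1 < ptypes.length then []  -- raise ValueError; excluded by Pre_
      else if (PySem.Dict.mk info).getD "title" "" = "" then
        (pvFindTitleA infos (PySem.Dict.mk info)).items
      else info
    else info

-- ===== PORT B =====
-- _types_consistent(infos, seen): structural recursion threading the first non-empty type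
def pvTypesConsistent : List (List (String × String)) → Option String → Bool
  | [], _ => true
  | d :: rest, seen =>
      let pt := (PySem.Dict.mk d).getD "principal_type" ""
      if pt ≠ "" ∧ seen ≠ none ∧ some pt ≠ seen then false
      else pvTypesConsistent rest (if pt ≠ "" then some pt else seen)

-- _first_nonempty_title(infos): structural recursion returning the first non-empty title
def pvFirstNonemptyTitle : List (List (String × String)) → Option String
  | [] => none
  | d :: rest =>
      let t := (PySem.Dict.mk d).getD "title" ""
      if t ≠ "" then some t else pvFirstNonemptyTitle rest

def merge_principal_infos_alt (infos : List (List (String × String))) (prefix_ : Bool) : List (String × String) :=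
  match infos with
  | [] => []  -- infos[0] raises IndexError; excluded by Pre_
  | info :: _ =>
    if 1 < infos.length then
      if pvTypesConsistent infos none = false then []  -- raise ValueError; excluded by Pre_
      else if (PySem.Dict.mk info).getD "title" "" = "" then
        match pvFirstNonemptyTitle infos with
        | some t => ((PySem.Dict.mk info).insert "title" t).items
        | none => info
      else info
    else info

-- ===== PRECONDITION & SPEC =====
-- Exactly the inputs on which the Python A returns: infos non-empty, and when it has ≥ 2 elements
-- every dict has a "principal_type" key, all non-empty principal_types coincide (else ValueError),
-- and each dict up to and including the first with a non-empty title has a "title" key.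
def Pre_merge_principal_infos (infos : List (List (String × String))) (prefix_ : Bool) : Prop :=
  infos ≠ [] ∧ (1 < infos.length →
    (∀ d ∈ infos, ((PySem.Dict.mk d).get? "principal_type").isSome) ∧
    (∀ d ∈ infos, ∀ e ∈ infos,
      (PySem.Dict.mk d).getD "principal_type" "" ≠ "" →
      (PySem.Dict.mk e).getD "principal_type" "" ≠ "" →
      (PySem.Dict.mk d).getD "principal_type" "" = (PySem.Dict.mk e).getD "principal_type" "") ∧
    (∀ i < infos.length,
      (∀ j < i, (PySem.Dict.mk (infos.getD j [])).get? "title" = some "") →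
      ((PySem.Dict.mk (infos.getD i [])).get? "title").isSome))
instance (infos : List (List (String × String))) (prefix_ : Bool) : Decidable (Pre_merge_principal_infos infos prefix_) := by unfold Pre_merge_principal_infos; infer_instance

def pvWitness_merge_principal_infos : (List (List (String × String))) × Bool :=
  ([[("principal_type", "user"), ("title", "Jane"), ("id", "jd")]], false)

def Spec_merge_principal_infos (infos : List (List (String × String))) (prefix_ : Bool) (out : List (String × String)) : Prop := out = merge_principal_infos_alt infos prefix_
instance (infos : List (List (String × String))) (prefix_ : Bool) (out : List (String × String)) : Decidable (Spec_merge_principal_infos infos prefix_ out) := by unfold Spec_merge_principal_infos; infer_instance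

-- ===== CLAIM (what is proved, stated in full; the proofs are below) =====
def Claim_equal_merge_principal_infos : Prop := ∀ (infos : List (List (String × String))) (prefix_ : Bool), Dom_merge_principal_infos infos prefix_ → Pre_merge_principal_infos infos prefix_ → Spec_merge_principal_infos infos prefix_ (merge_principal_infos infos prefix_)

-- ===== LEMMAS AND PROOFS =====

-- the first non-empty title of the list, the value both scans agree on
def pvFirstTitle (l : List (List (String × String))) : Option String :=
  (l.find? (fun d => (PySem.Dict.mk d).getD "title" "" ≠ "")).map
    (fun d => (PySem.Dict.mk d).getD "title" "")

lemma pvFindTitleA_eq (l : List (List (String × String))) (info : PySem.Dict String String) :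
    pvFindTitleA l info = match pvFirstTitle l with
      | some t => info.insert "title" t
      | none => info := by
  induction l with
  | nil => simp [pvFindTitleA, pvFirstTitle]
  | cons c rest ih =>
      by_cases h : (PySem.Dict.mk c).getD "title" "" ≠ ""
      · simp [pvFindTitleA, pvFirstTitle, h, List.find?]
      · simp only [ne_eq, not_not] at h
        simp [pvFindTitleA, pvFirstTitle, h, List.find?] at ih ⊢
        exact ih

lemma pvFirstNonemptyTitle_eq (l : List (List (String × String))) :
    pvFirstNonemptyTitle l = pvFirstTitle l := by
  induction l with
  | nil => simp [pvFirstNonemptyTitle, pvFirstTitle]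
  | cons c rest ih =>
      by_cases h : (PySem.Dict.mk c).getD "title" "" ≠ "" <;>
        simp [pvFirstNonemptyTitle, pvFirstTitle, List.find?, h] at ih ⊢ <;> exact ih

lemma pvTypesConsistent_true (l : List (List (String × String))) (v : String)
    (hv : ∀ d ∈ l, (PySem.Dict.mk d).getD "principal_type" "" ≠ "" →
          (PySem.Dict.mk d).getD "principal_type" "" = v) :
    ∀ seen : Option String, (seen = none ∨ seen = some v) →
    pvTypesConsistent l seen = true := by
  induction l with
  | nil => intro seen _; rfl
  | cons c rest ih =>
      intro seen hs
      have hv' : ∀ d ∈ rest, (PySem.Dict.mk d).getD "principal_type" "" ≠ "" →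
          (PySem.Dict.mk d).getD "principal_type" "" = v :=
        fun d hd => hv d (List.mem_cons_of_mem _ hd)
      by_cases hpt : (PySem.Dict.mk c).getD "principal_type" "" ≠ ""
      · have hcv := hv c List.mem_cons_self hpt
        have hnor : ¬ ((PySem.Dict.mk c).getD "principal_type" "" ≠ "" ∧ seen ≠ none ∧
            some ((PySem.Dict.mk c).getD "principal_type" "") ≠ seen) := by
          rcases hs with h | h <;> simp [h, hcv]
        rw [pvTypesConsistent, if_neg hnor, if_pos hpt]
        exact ih hv' _ (Or.inr (by rw [hcv]))
      · simp only [ne_eq, not_not] at hpt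
        rw [pvTypesConsistent]
        simp only [hpt, ne_eq, not_true_eq_false, false_and, if_neg, not_false_eq_true, if_false]
        exact ih hv' seen hs

lemma pvSetFold_small (l : List (List (String × String))) (v : String)
    (hv : ∀ d ∈ l, (PySem.Dict.mk d).getD "principal_type" "" ≠ "" →
          (PySem.Dict.mk d).getD "principal_type" "" = v) :
    ∀ s : PySem.Set String, (s = [] ∨ s = [v]) →
    (l.foldl (fun s d =>
        let pt := (PySem.Dict.mk d).getD "principal_type" ""
        if pt ≠ "" then PySem.Set.add s pt else s) s = [] ∨
     l.foldl (fun s d =>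
        let pt := (PySem.Dict.mk d).getD "principal_type" ""
        if pt ≠ "" then PySem.Set.add s pt else s) s = [v]) := by
  induction l with
  | nil => intro s hs; simpa using hs
  | cons c rest ih =>
      intro s hs
      have hv' : ∀ d ∈ rest, (PySem.Dict.mk d).getD "principal_type" "" ≠ "" →
          (PySem.Dict.mk d).getD "principal_type" "" = v :=
        fun d hd => hv d (List.mem_cons_of_mem _ hd)
      simp only [List.foldl_cons]
      apply ih hv'
      by_cases hpt : (PySem.Dict.mk c).getD "principal_type" "" ≠ ""
      · have hcv := hv c (List.mem_cons_self) hpt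
        rcases hs with h | h <;>
          simp [h, hcv, PySem.Set.add, PySem.Set.contains] <;>
          try exact Or.elim (eq_or_ne v "") (fun hh => Or.inl hh) (fun hh => Or.inr hh)
      · simp only [ne_eq, not_not] at hpt
        simpa [hpt] using hs

-- ===== VERDICT (by name: the statement is the Claim_ definition above) =====
theorem merge_principal_infos_spec : Claim_equal_merge_principal_infos := by
  intro infos prefix_ _hdom hpre
  unfold Spec_merge_principal_infos
  match infos with
  | [] => rfl
  | info :: rest =>
    by_cases hlen : 1 < (info :: rest).length
    · obtain ⟨-, hbig⟩ := hpre
      obtain ⟨-, hpair, -⟩ := hbig hlen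
      have hex : ∃ v : String, ∀ d ∈ (info :: rest),
          (PySem.Dict.mk d).getD "principal_type" "" ≠ "" →
          (PySem.Dict.mk d).getD "principal_type" "" = v := by
        by_cases hall : ∀ d ∈ (info :: rest), (PySem.Dict.mk d).getD "principal_type" "" = ""
        · exact ⟨"", fun d hd hne => absurd (hall d hd) hne⟩
        · push_neg at hall
          obtain ⟨d0, hd0, hne0⟩ := hall
          exact ⟨(PySem.Dict.mk d0).getD "principal_type" "",
            fun d hd hne => hpair d hd d0 hd0 hne hne0⟩
      obtain ⟨v, hv⟩ := hex
      have hset := pvSetFold_small (info :: rest) v hv PySem.Set.empty (Or.inl rfl)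
      have hcons := pvTypesConsistent_true (info :: rest) v hv none (Or.inl rfl)
      have hsmall : ¬ 1 < ((info :: rest).foldl (fun s d =>
          let pt := (PySem.Dict.mk d).getD "principal_type" ""
          if pt ≠ "" then PySem.Set.add s pt else s) PySem.Set.empty).length := by
        rcases hset with h | h <;> rw [h] <;> simp
      rw [merge_principal_infos, merge_principal_infos_alt, if_pos hlen, if_pos hlen,
        if_neg hsmall, hcons]
      simp only [Bool.true_eq_false, if_false]
      by_cases ht : (PySem.Dict.mk info).getD "title" "" = ""
      · rw [if_pos ht, if_pos ht, pvFindTitleA_eq, pvFirstNonemptyTitle_eq]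
        cases pvFirstTitle (info :: rest) <;> rfl
      · rw [if_neg ht, if_neg ht]
    · rw [merge_principal_infos, merge_principal_infos_alt, if_neg hlen, if_neg hlen]
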